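-- pv_equiv track=rewrite | github.com/AmishaLearning/PYTHON | Python_3/Cisco.py | find_max_apples
-- ===== SOURCE A (Python) =====
-- def find_max_apples(max_size_difference, apple_sizes):
--     apple_sizes.sort()  # Sort the apple sizes in ascending order
--     start = 0
--     max_apples = 0
--
--     for end in range(len(apple_sizes)):
--         while apple_sizes[end] - apple_sizes[start] > max_size_difference:
--             start += 1
--
--         max_apples = max(max_apples, end - start + 1)
--
--     return max_apples
-- ===== SOURCE B (Python) =====
-- def find_max_apples(max_size_difference, apple_sizes):
--     apple_sizes.sort()  # keep A's in-place sort (same mutation side effect)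
--     max_apples = 0
--     for end in range(len(apple_sizes)):
--         # binary search for the leftmost index whose size is within the window
--         target = apple_sizes[end] - max_size_difference
--         lo, hi = 0, end + 1
--         while lo < hi:
--             mid = (lo + hi) // 2
--             if apple_sizes[mid] < target:
--                 lo = mid + 1
--             else:
--                 hi = mid
--         max_apples = max(max_apples, end - lo + 1)
--     return max_apples
-- ===== Notes on version B (the rewrite author's own statement) =====
-- stated objective: alternative
-- what changed: Replaces A's persistent two-pointer window scan after the sort with a per-element binary search (hand-written bisect_left) into the sorted prefix to find the leftmost valid window start.
import Mathlib
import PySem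

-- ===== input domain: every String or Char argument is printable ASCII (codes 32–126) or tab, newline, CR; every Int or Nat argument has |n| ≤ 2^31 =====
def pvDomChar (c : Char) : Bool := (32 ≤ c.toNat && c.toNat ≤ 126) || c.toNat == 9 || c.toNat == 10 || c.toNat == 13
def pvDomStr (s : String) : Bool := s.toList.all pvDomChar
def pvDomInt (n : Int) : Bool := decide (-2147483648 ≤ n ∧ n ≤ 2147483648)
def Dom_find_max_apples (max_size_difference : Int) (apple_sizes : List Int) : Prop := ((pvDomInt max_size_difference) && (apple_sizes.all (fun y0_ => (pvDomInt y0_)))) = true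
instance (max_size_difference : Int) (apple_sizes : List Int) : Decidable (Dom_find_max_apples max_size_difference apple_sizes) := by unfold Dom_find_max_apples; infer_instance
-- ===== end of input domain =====

-- B replaces A's persistent two-pointer scan with a per-element binary search into the
-- sorted prefix (alternative algorithm, similar cost); both sort the argument in place in
-- Python, and the equivalence proved here is about the return value.
-- Pre_ excludes inputs on which A raises IndexError (negative allowed difference with a
-- nonempty list: the start pointer runs past the end of the list).


-- ===== PORT A =====
-- the inner `while apple_sizes[end] - apple_sizes[start] > max_size_difference: start += 1`;
-- a `none` from pyGet? is Python's IndexError path (excluded by Pre_), the loop stops there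
-- structural recursion on the iteration bound k (the loop runs at most a.length + 1 times,
-- the bound the port passes; each step advances start by one)
def pvWhileA (d : Int) (a : List Int) (v : Int) : Nat → Nat → Nat
  | 0, start => start
  | k + 1, start =>
    match PySem.List.pyGet? a (start : Int) with
    | none => start
    | some w => if v - w > d then pvWhileA d a v k (start + 1) else start

def find_max_apples (max_size_difference : Int) (apple_sizes : List Int) : Int :=
  let a := PySem.List.sorted apple_sizes (fun x => x) false
  let r := (List.range a.length).foldl
    (fun (st : Nat × Int) (e : Nat) =>
      let start := pvWhileA max_size_difference a (PySem.List.pyGetD a (e : Int) 0) (a.length + 1) st.1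
      (start, max st.2 ((e : Int) - start + 1)))
    (0, 0)
  r.2

-- ===== PORT B =====
-- the hand-written `while lo < hi: mid = (lo+hi)//2; …` binary search from Source B
-- structural recursion on the iteration bound k (the interval [lo, hi) shrinks strictly
-- each step, so k = hi iterations always suffice; the port passes k = e + 1)
def pvBisect (a : List Int) (target : Int) : Nat → Nat → Nat → Nat
  | 0, lo, _ => lo
  | k + 1, lo, hi =>
    if lo < hi then
      let mid := (lo + hi) / 2
      if PySem.List.pyGetD a (mid : Int) 0 < target then pvBisect a target k (mid + 1) hi
      else pvBisect a target k lo mid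
    else lo

def find_max_apples_alt (max_size_difference : Int) (apple_sizes : List Int) : Int :=
  let a := PySem.List.sorted apple_sizes (fun x => x) false
  (List.range a.length).foldl
    (fun (m : Int) (e : Nat) =>
      let target := PySem.List.pyGetD a (e : Int) 0 - max_size_difference
      let lo := pvBisect a target (e + 1) 0 (e + 1)
      max m ((e : Int) - lo + 1))
    0

-- ===== PRECONDITION & SPEC =====
-- Pre_ excludes exactly the inputs where A raises IndexError: a negative maximum
-- difference with a nonempty list makes A's start pointer run past the last index.
def Pre_find_max_apples (max_size_difference : Int) (apple_sizes : List Int) : Prop :=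
  apple_sizes = [] ∨ 0 ≤ max_size_difference
instance (max_size_difference : Int) (apple_sizes : List Int) : Decidable (Pre_find_max_apples max_size_difference apple_sizes) := by unfold Pre_find_max_apples; infer_instance
def pvWitness_find_max_apples : Int × List Int := (2, [5, 1, 3, 8])

def Spec_find_max_apples (max_size_difference : Int) (apple_sizes : List Int) (out : Int) : Prop := out = find_max_apples_alt max_size_difference apple_sizes
instance (max_size_difference : Int) (apple_sizes : List Int) (out : Int) : Decidable (Spec_find_max_apples max_size_difference apple_sizes out) := by unfold Spec_find_max_apples; infer_instance

-- ===== CLAIM (what is proved, stated in full; the proofs are below) =====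
def Claim_equal_find_max_apples : Prop := ∀ (max_size_difference : Int) (apple_sizes : List Int), Dom_find_max_apples max_size_difference apple_sizes → Pre_find_max_apples max_size_difference apple_sizes → Spec_find_max_apples max_size_difference apple_sizes (find_max_apples max_size_difference apple_sizes)

-- ===== LEMMAS AND PROOFS =====

-- c a x = number of elements of a below x = (in a sorted list) the leftmost fitting index
def pvCnt (a : List Int) (x : Int) : Nat := a.countP (fun w => decide (w < x))

theorem pvCnt_char (a : List Int) (x : Int) :
    a.Pairwise (· ≤ ·) → ∀ i, (h : i < a.length) → (a[i] < x ↔ i < pvCnt a x) := by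
  induction a with
  | nil => intro _ i h; simp at h
  | cons hd t ih =>
    intro hs i h
    rw [List.pairwise_cons] at hs
    have hzero : ¬ hd < x → pvCnt t x = 0 := by
      intro hn
      simp only [pvCnt, List.countP_eq_zero]
      intro w hw; have := hs.1 w hw; simp; omega
    cases i with
    | zero =>
      simp only [List.getElem_cons_zero]
      by_cases hhd : hd < x
      · have hc : pvCnt (hd :: t) x = pvCnt t x + 1 := by
          simp only [pvCnt, List.countP_cons]; simp [hhd]
        rw [hc]; constructor <;> intro _ <;> omega
      · have h0 := hzero hhd
        have hc : pvCnt (hd :: t) x = 0 := by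
          simp only [pvCnt, List.countP_cons] at h0 ⊢; simp [hhd, h0]
        rw [hc]; constructor <;> intro h' <;> [exact absurd h' hhd; omega]
    | succ j =>
      have hj : j < t.length := by simpa using h
      simp only [List.getElem_cons_succ]
      have iht := ih hs.2 j hj
      by_cases hhd : hd < x
      · have hc : pvCnt (hd :: t) x = pvCnt t x + 1 := by
          simp only [pvCnt, List.countP_cons]; simp [hhd]
        rw [hc]; omega
      · have h0 := hzero hhd
        have hc : pvCnt (hd :: t) x = 0 := by
          simp only [pvCnt, List.countP_cons] at h0 ⊢; simp [hhd, h0]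
        have hge : ¬ t[j] < x := by
          have := hs.1 t[j] (List.getElem_mem hj); omega
        rw [hc]; constructor <;> intro h' <;> [exact absurd h' hge; omega]

theorem pvCnt_mono (a : List Int) (x y : Int) (h : x ≤ y) : pvCnt a x ≤ pvCnt a y := by
  apply List.countP_mono_left
  intro w _ hw
  simp at hw ⊢; omega

theorem pvCnt_le_length (a : List Int) (x : Int) : pvCnt a x ≤ a.length :=
  List.countP_le_length

theorem pvWhileA_eq (d : Int) (a : List Int) (hs : a.Pairwise (· ≤ ·)) (v : Int) :
    ∀ k s, pvCnt a (v - d) - s ≤ k → s ≤ pvCnt a (v - d) →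
      pvWhileA d a v k s = pvCnt a (v - d) := by
  have hclen := pvCnt_le_length a (v - d)
  intro k
  induction k with
  | zero =>
    intro s hk hle
    simp only [pvWhileA]
    omega
  | succ k ih =>
    intro s hk hle
    rcases Nat.eq_or_lt_of_le hle with hseq | hslt
    · simp only [pvWhileA]
      split
      · exact hseq
      · rename_i w heq
        rw [PySem.List.pyGet?_natCast] at heq
        obtain ⟨hlt, hval⟩ := List.getElem?_eq_some_iff.mp heq
        have hnotlt : ¬ (v - w > d) := by
          intro hgt
          have hx : a[s] < v - d := by rw [hval]; omega
          have := (pvCnt_char a (v - d) hs s hlt).mp hx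
          omega
        rw [if_neg hnotlt]; exact hseq
    · have hlt : s < a.length := by omega
      simp only [pvWhileA]
      split
      · rename_i heq
        rw [PySem.List.pyGet?_natCast, List.getElem?_eq_none_iff] at heq
        omega
      · rename_i w heq
        rw [PySem.List.pyGet?_natCast] at heq
        obtain ⟨hlt', hval⟩ := List.getElem?_eq_some_iff.mp heq
        have hvw : a[s] < v - d := (pvCnt_char a (v - d) hs s hlt').mpr hslt
        have hgt : v - w > d := by omega
        rw [if_pos hgt]
        exact ih (s + 1) (by omega) (by omega)

theorem pvBisect_eq (a : List Int) (hs : a.Pairwise (· ≤ ·)) (x : Int) :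
    ∀ k lo hi, hi - lo ≤ k → lo ≤ pvCnt a x → pvCnt a x ≤ hi → hi ≤ a.length →
      pvBisect a x k lo hi = pvCnt a x := by
  intro k
  induction k with
  | zero =>
    intro lo hi hk h1 h2 _
    simp only [pvBisect]
    omega
  | succ k ih =>
    intro lo hi hk h1 h2 h3
    rcases Nat.lt_or_ge lo hi with hlh | hlh
    · simp only [pvBisect]
      rw [if_pos hlh]
      have hmid : (lo + hi) / 2 < a.length := by omega
      have hget : PySem.List.pyGetD a (((lo + hi) / 2 : Nat) : Int) 0 = a[(lo + hi) / 2] := by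
        rw [PySem.List.pyGetD_natCast]; exact List.getD_eq_getElem a 0 hmid
      simp only [hget]
      by_cases hc : a[(lo + hi) / 2] < x
      · have := (pvCnt_char a x hs _ hmid).mp hc
        rw [if_pos hc]
        exact ih ((lo + hi) / 2 + 1) hi (by omega) (by omega) h2 h3
      · have hnc : ¬ ((lo + hi) / 2 < pvCnt a x) :=
          fun hl => hc ((pvCnt_char a x hs _ hmid).mpr hl)
        rw [if_neg hc]
        exact ih lo ((lo + hi) / 2) (by omega) h1 (by omega) (by omega)
    · simp only [pvBisect]
      rw [if_neg (by omega)]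
      omega

-- the fold invariant: equal running maxima, and A's pointer never ahead of any future cut
theorem pv_fold_eq (d : Int) (hd : 0 ≤ d) (a : List Int) (hs : a.Pairwise (· ≤ ·)) :
    ∀ n, n ≤ a.length →
      (((List.range n).foldl
          (fun (st : Nat × Int) (e : Nat) =>
            let start := pvWhileA d a (PySem.List.pyGetD a (e : Int) 0) (a.length + 1) st.1
            (start, max st.2 ((e : Int) - start + 1))) (0, 0)).2
        = (List.range n).foldl
            (fun (m : Int) (e : Nat) =>
              let target := PySem.List.pyGetD a (e : Int) 0 - d
              let lo := pvBisect a target (e + 1) 0 (e + 1)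
              max m ((e : Int) - lo + 1)) 0)
      ∧ (∀ j, n ≤ j → j < a.length →
          ((List.range n).foldl
            (fun (st : Nat × Int) (e : Nat) =>
              let start := pvWhileA d a (PySem.List.pyGetD a (e : Int) 0) (a.length + 1) st.1
              (start, max st.2 ((e : Int) - start + 1))) (0, 0)).1
            ≤ pvCnt a (PySem.List.pyGetD a (j : Int) 0 - d)) := by
  intro n
  induction n with
  | zero => exact fun _ => ⟨rfl, fun j _ _ => Nat.zero_le _⟩
  | succ n ih =>
    intro hn1
    have hn : n < a.length := by omega
    obtain ⟨ihv, ihp⟩ := ih (by omega)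
    have hgn : PySem.List.pyGetD a ((n : Nat) : Int) 0 = a[n] := by
      rw [PySem.List.pyGetD_natCast]; exact List.getD_eq_getElem a 0 hn
    have hstart :
        pvWhileA d a (PySem.List.pyGetD a ((n : Nat) : Int) 0) (a.length + 1)
          (((List.range n).foldl
            (fun (st : Nat × Int) (e : Nat) =>
              let start := pvWhileA d a (PySem.List.pyGetD a (e : Int) 0) (a.length + 1) st.1
              (start, max st.2 ((e : Int) - start + 1))) (0, 0)).1)
          = pvCnt a (a[n] - d) := by
      rw [hgn]
      apply pvWhileA_eq d a hs a[n] (a.length + 1)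
      · have := pvCnt_le_length a (a[n] - d); omega
      · have := ihp n (le_refl n) hn
        rwa [hgn] at this
    have hcle : pvCnt a (a[n] - d) ≤ n + 1 := by
      have hnot : ¬ a[n] < a[n] - d := by omega
      have := (pvCnt_char a (a[n] - d) hs n hn)
      omega
    have hbis : pvBisect a (PySem.List.pyGetD a ((n : Nat) : Int) 0 - d) (n + 1) 0 (n + 1)
        = pvCnt a (a[n] - d) := by
      rw [hgn]
      exact pvBisect_eq a hs (a[n] - d) (n + 1) 0 (n + 1) (by omega) (Nat.zero_le _) hcle (by omega)
    constructor
    · rw [List.range_succ, List.foldl_append, List.foldl_append]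
      simp only [List.foldl_cons, List.foldl_nil]
      rw [hstart, hbis, ihv]
    · intro j hj hjlt
      rw [List.range_succ, List.foldl_append]
      simp only [List.foldl_cons, List.foldl_nil]
      rw [hstart]
      have hgj : PySem.List.pyGetD a ((j : Nat) : Int) 0 = a[j] := by
        rw [PySem.List.pyGetD_natCast]; exact List.getD_eq_getElem a 0 hjlt
      rw [hgj]
      apply pvCnt_mono
      have hmono : a[n] ≤ a[j] := by
        rcases Nat.lt_or_ge n j with h | h
        · exact List.pairwise_iff_getElem.mp hs n j hn hjlt h
        · have hnj : n = j := by omega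
          subst hnj; exact le_refl _
      omega

-- ===== VERDICT (by name: the statement is the Claim_ definition above) =====
theorem find_max_apples_spec : Claim_equal_find_max_apples := by
  intro d xs _ hpre
  unfold Spec_find_max_apples find_max_apples find_max_apples_alt
  rcases hpre with hnil | hd
  · subst hnil; rfl
  · have hs := PySem.List.sorted_pairwise (xs := xs) (key := fun x => x) -- may need adjusting
    exact (pv_fold_eq d hd _ hs _ (le_refl _)).1
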